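-- pv_equiv track=rewrite | github.com/MihaiAC/algorithms-and-data-structures | advent_of_code_2024/day21/p1.py | code_to_minimal_length_combos
-- ===== SOURCE A (Python) =====
-- from typing import Dict, Tuple, List
--
-- def code_to_minimal_length_combos(combo_schema: Dict[Tuple[str, str], List[str]], equivalent_codes: List[str]) -> List[str]:
--     final_combos = []
--     for code in equivalent_codes:
--         code = 'A' + code
--         curr_combos = ['']
--         for idx in range(len(code)-1):
--             new_combos = []
--             transition = (code[idx], code[idx+1])
--             for combo in curr_combos:
--                 for minimal_combo in combo_schema[transition]:
--                     new_combos.append(combo + minimal_combo)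
--             curr_combos = new_combos
--         final_combos += curr_combos
--
--     min_len = min([len(x) for x in final_combos])
--     return [x for x in final_combos if len(x) == min_len]
-- ===== SOURCE B (Python) =====
-- def _expand(options):
--     if not options:
--         return ['']
--     rest = _expand(options[1:])
--     return [o + r for o in options[0] for r in rest]
--
--
-- def _code_combos(combo_schema, code):
--     full = 'A' + code
--     options = []
--     for i in range(len(full) - 1):
--         opts = combo_schema[(full[i], full[i + 1])]
--         if not opts:
--             return []
--         options.append(opts)
--     return _expand(options)
--
--
-- def code_to_minimal_length_combos(combo_schema, equivalent_codes):
--     final_combos = [c for code in equivalent_codes for c in _code_combos(combo_schema, code)]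
--     min_len = min([len(x) for x in final_combos])
--     return [x for x in final_combos if len(x) == min_len]
-- ===== Notes on version B (the rewrite author's own statement) =====
-- stated objective: alternative
-- what changed: A grows the combo list transition by transition with an accumulator loop; B first builds the per-transition option table (stopping early at an empty option list) and then generates the combos by a recursive cartesian product, and the final minimum-length filter is unchanged.
import Mathlib
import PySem

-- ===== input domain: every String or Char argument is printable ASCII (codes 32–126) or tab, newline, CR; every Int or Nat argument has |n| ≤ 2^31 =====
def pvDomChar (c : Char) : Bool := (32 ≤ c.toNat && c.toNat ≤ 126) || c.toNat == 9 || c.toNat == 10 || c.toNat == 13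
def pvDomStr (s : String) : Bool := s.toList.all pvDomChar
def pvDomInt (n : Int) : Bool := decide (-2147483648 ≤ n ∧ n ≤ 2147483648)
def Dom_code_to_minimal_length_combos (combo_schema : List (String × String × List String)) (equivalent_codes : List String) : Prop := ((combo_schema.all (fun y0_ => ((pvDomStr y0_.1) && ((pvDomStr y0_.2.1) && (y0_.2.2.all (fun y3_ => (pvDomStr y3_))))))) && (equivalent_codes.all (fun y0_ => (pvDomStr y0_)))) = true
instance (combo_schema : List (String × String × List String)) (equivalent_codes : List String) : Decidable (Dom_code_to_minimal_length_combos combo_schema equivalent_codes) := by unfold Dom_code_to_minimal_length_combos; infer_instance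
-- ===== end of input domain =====

-- B replaces A's incremental combo accumulation with a precomputed per-transition option table
-- (built with early exit on an empty option list) and a recursive cartesian product; objective: alternative.


-- shared helpers (dict[(c1,c2)] first-match lookup, and the transition pair (code[i], code[i+1]))
def pvSchemaDict (cs : List (String × String × List String)) : PySem.Dict (String × String) (List String) :=
  PySem.Dict.mk (cs.map (fun e => ((e.1, e.2.1), e.2.2)))

def pvLookup (cs : List (String × String × List String)) (t : String × String) : List String :=
  PySem.Dict.getD (pvSchemaDict cs) t []

def pvTrans (full : String) (i : Int) : String × String :=
  (((PySem.Str.pyGet? full i).map (fun c => String.ofList [c])).getD "",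
   ((PySem.Str.pyGet? full (i + 1)).map (fun c => String.ofList [c])).getD "")

-- ===== PORT A =====
def code_to_minimal_length_combos (combo_schema : List (String × String × List String)) (equivalent_codes : List String) : List String :=
  let finalCombos := equivalent_codes.foldl (fun acc code0 =>
    let code := "A" ++ code0
    let curr := (PySem.List.pyRange 0 (PySem.Str.len code - 1) 1).foldl
      (fun cur idx =>
        cur.flatMap (fun combo => (pvLookup combo_schema (pvTrans code idx)).map (fun mc => combo ++ mc)))
      [""]
    acc ++ curr) []
  -- min([]) raises ValueError in Python: that input is excluded by Pre_
  match PySem.List.min? (finalCombos.map (fun x => PySem.Str.len x)) (fun v => v) with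
  | none => []
  | some m => finalCombos.filter (fun x => PySem.Str.len x == m)

-- ===== PORT B =====
def pvExpand : List (List String) → List String
  | [] => [""]
  | opts :: rest => opts.flatMap (fun o => (pvExpand rest).map (fun r => o ++ r))

def pvBuildOptions (cs : List (String × String × List String)) (full : String) : List Int → Option (List (List String))
  | [] => some []
  | i :: rest =>
      let opts := pvLookup cs (pvTrans full i)
      if opts = [] then none
      else (pvBuildOptions cs full rest).map (fun os => opts :: os)

def pvCodeCombos (cs : List (String × String × List String)) (code0 : String) : List String :=
  let full := "A" ++ code0
  match pvBuildOptions cs full (PySem.List.pyRange 0 (PySem.Str.len full - 1) 1) with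
  | none => []          -- early 'return []' on an empty option list
  | some options => pvExpand options

def code_to_minimal_length_combos_alt (combo_schema : List (String × String × List String)) (equivalent_codes : List String) : List String :=
  let finalCombos := equivalent_codes.flatMap (fun code0 => pvCodeCombos combo_schema code0)
  match PySem.List.min? (finalCombos.map (fun x => PySem.Str.len x)) (fun v => v) with
  | none => []
  | some m => finalCombos.filter (fun x => PySem.Str.len x == m)

-- ===== PRECONDITION & SPEC =====
-- Pre_ excludes exactly the inputs where the Python A raises: a KeyError (a transition that is
-- actually reached — all earlier transitions of its code have nonempty option lists — is missing
-- from combo_schema) or the ValueError of min([]) (no code yields any combo).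
def Pre_code_to_minimal_length_combos (combo_schema : List (String × String × List String)) (equivalent_codes : List String) : Prop :=
  (∀ code0 ∈ equivalent_codes, ∀ i ∈ PySem.List.pyRange 0 (PySem.Str.len ("A" ++ code0) - 1) 1,
      (∀ j ∈ PySem.List.pyRange 0 (PySem.Str.len ("A" ++ code0) - 1) 1, j < i →
          pvLookup combo_schema (pvTrans ("A" ++ code0) j) ≠ []) →
      (PySem.Dict.get? (pvSchemaDict combo_schema) (pvTrans ("A" ++ code0) i)).isSome = true)
  ∧ (∃ code0 ∈ equivalent_codes, ∀ i ∈ PySem.List.pyRange 0 (PySem.Str.len ("A" ++ code0) - 1) 1,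
      pvLookup combo_schema (pvTrans ("A" ++ code0) i) ≠ [])

instance (combo_schema : List (String × String × List String)) (equivalent_codes : List String) : Decidable (Pre_code_to_minimal_length_combos combo_schema equivalent_codes) := by unfold Pre_code_to_minimal_length_combos; infer_instance

def pvWitness_code_to_minimal_length_combos : (List (String × String × List String)) × List String :=
  ([("A", "0", ["x"])], ["0"])

def Spec_code_to_minimal_length_combos (combo_schema : List (String × String × List String)) (equivalent_codes : List String) (out : List String) : Prop := out = code_to_minimal_length_combos_alt combo_schema equivalent_codes
instance (combo_schema : List (String × String × List String)) (equivalent_codes : List String) (out : List String) : Decidable (Spec_code_to_minimal_length_combos combo_schema equivalent_codes out) := by unfold Spec_code_to_minimal_length_combos; infer_instance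

-- ===== CLAIM (what is proved, stated in full; the proofs are below) =====
def Claim_equal_code_to_minimal_length_combos : Prop := ∀ (combo_schema : List (String × String × List String)) (equivalent_codes : List String), Dom_code_to_minimal_length_combos combo_schema equivalent_codes → Pre_code_to_minimal_length_combos combo_schema equivalent_codes → Spec_code_to_minimal_length_combos combo_schema equivalent_codes (code_to_minimal_length_combos combo_schema equivalent_codes)

-- ===== LEMMAS AND PROOFS =====

-- A's per-code accumulation loop equals B's option table + recursive product,
-- for any index list and any starting accumulator.
theorem foldl_eq_expand_build (cs : List (String × String × List String)) (full : String) :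
    ∀ (idxs : List Int) (acc : List String),
      idxs.foldl (fun cur idx =>
          cur.flatMap (fun combo => (pvLookup cs (pvTrans full idx)).map (fun mc => combo ++ mc))) acc
        = acc.flatMap (fun c =>
            (match pvBuildOptions cs full idxs with
             | none => []
             | some options => pvExpand options).map (fun r => c ++ r)) := by
  intro idxs
  induction idxs with
  | nil =>
      intro acc
      simp [pvBuildOptions, pvExpand]
  | cons i rest ih =>
      intro acc
      have h1 : ∀ (l : List String), l.flatMap (fun _ => ([] : List String)) = [] := by
        intro l; simp
      by_cases h : pvLookup cs (pvTrans full i) = []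
      · simp only [List.foldl_cons, ih, pvBuildOptions, h, List.map_nil]
        simp [h1]
      · simp only [List.foldl_cons, ih, pvBuildOptions, if_neg h]
        cases hb : pvBuildOptions cs full rest with
        | none =>
            simp only [Option.map_none]
            rw [List.flatMap_assoc]
            simp [h1]
        | some options =>
            simp only [Option.map_some, pvExpand]
            rw [List.flatMap_assoc]
            simp [List.flatMap_map, List.map_flatMap, List.map_map, Function.comp_def,
                  String.append_assoc]

theorem perCode_eq (cs : List (String × String × List String)) (code0 : String) :
    (PySem.List.pyRange 0 (PySem.Str.len ("A" ++ code0) - 1) 1).foldl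
        (fun cur idx =>
          cur.flatMap (fun combo =>
            (pvLookup cs (pvTrans ("A" ++ code0) idx)).map (fun mc => combo ++ mc))) [""]
      = pvCodeCombos cs code0 := by
  rw [foldl_eq_expand_build]
  simp [pvCodeCombos]

-- ===== VERDICT (by name: the statement is the Claim_ definition above) =====
theorem code_to_minimal_length_combos_spec : Claim_equal_code_to_minimal_length_combos := by
  intro cs codes _ _
  unfold Spec_code_to_minimal_length_combos
  unfold code_to_minimal_length_combos code_to_minimal_length_combos_alt
  have hfin : codes.foldl (fun acc code0 =>
      acc ++ (PySem.List.pyRange 0 (PySem.Str.len ("A" ++ code0) - 1) 1).foldl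
        (fun cur idx =>
          cur.flatMap (fun combo =>
            (pvLookup cs (pvTrans ("A" ++ code0) idx)).map (fun mc => combo ++ mc))) [""]) []
      = codes.flatMap (fun code0 => pvCodeCombos cs code0) := by
    rw [← List.flatMap_eq_foldl]
    simp only [perCode_eq]
  simp only [hfin]
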